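-- pv_equiv track=rewrite | github.com/Fondamenti18/fondamenti-di-programmazione | students/1803699/homework01/program03.py | becomeencripter
-- ===== SOURCE A (Python) =====
-- def becomekey(x):
-- 	chiave=''
-- 	for i in range(0, len(x)):
-- 		if x[i].islower()==True:
-- 			chiave+=x[i]
-- 	return chiave
--
-- def disordinata(k):
-- 	visto = []
-- 	for i in k[::-1]:
-- 		if i not in visto:
-- 			visto.append(i)
-- 	return list(reversed(visto))
--
-- def becomeencripter(y):
-- 	p=becomekey(y)
-- 	m=disordinata(p)
-- 	n=sorted(m)
-- 	encripter={}
-- 	for i in range(0, len(m)):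
-- 		encripter[n[i]]=m[i]
-- 	return encripter
-- ===== SOURCE B (Python) =====
-- def becomeencripter(y):
--     p = [c for c in y if c.islower()]
--     remaining = {}
--     for c in p:
--         remaining[c] = remaining.get(c, 0) + 1
--     m = []
--     for c in p:
--         remaining[c] = remaining[c] - 1
--         if remaining[c] == 0:
--             m.append(c)
--     n = sorted(m)
--     return {a: b for a, b in zip(n, m)}
-- ===== Notes on version B (the rewrite author's own statement) =====
-- stated objective: alternative
-- what changed: Replaces A's reverse-the-string/seen-list accumulator dedup and its per-index dict-insert loop with a single forward counting pass (a char is kept exactly when its remaining-occurrence count reaches 0, i.e. at its last occurrence) and one dict built from zip(sorted(m), m).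
import Mathlib
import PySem

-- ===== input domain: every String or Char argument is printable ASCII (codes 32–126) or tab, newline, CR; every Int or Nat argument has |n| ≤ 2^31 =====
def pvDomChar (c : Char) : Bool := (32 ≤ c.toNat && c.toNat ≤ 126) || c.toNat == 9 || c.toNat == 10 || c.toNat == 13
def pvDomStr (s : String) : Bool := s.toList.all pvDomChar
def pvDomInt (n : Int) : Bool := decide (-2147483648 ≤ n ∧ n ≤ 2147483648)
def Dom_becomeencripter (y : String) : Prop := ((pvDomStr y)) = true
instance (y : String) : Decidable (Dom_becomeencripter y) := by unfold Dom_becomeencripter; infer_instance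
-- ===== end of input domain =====

-- B replaces A's reverse-scan/seen-list dedup and its per-index dict-insert loop with a
-- counting pass (a char is kept when its remaining count reaches 0, i.e. at its last
-- occurrence) and one dict built from zip(sorted(m), m).
-- Python's 1-char strings are handled as List Char inside the helpers (PySem convention).

-- ===== PORT A =====
-- becomekey: chiave=''; for i in range(0, len(x)): if x[i].islower()==True: chiave += x[i]
def pvBecomekey (x : List Char) : List Char :=
  (PySem.List.pyRange 0 (x.length : Int) 1).foldl
    (fun chiave i =>
      if PySem.Chars.islower (PySem.List.pyGetD x i ' ') = true then
        chiave ++ [PySem.List.pyGetD x i ' ']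
      else chiave) []

-- disordinata: visto=[]; for i in k[::-1]: if i not in visto: visto.append(i); return list(reversed(visto))
def pvDisordinata (k : List Char) : List Char :=
  (((PySem.List.slice? k none none (-1)).getD []).foldl
    (fun visto i => if i ∈ visto then visto else visto ++ [i]) []).reverse

def becomeencripter (y : String) : List (String × String) :=
  let p := pvBecomekey y.toList
  let m := pvDisordinata p
  let n := PySem.List.sorted m (fun c => c) false
  let encripter := (PySem.List.pyRange 0 (m.length : Int) 1).foldl
    (fun d i => d.insert (String.ofList [PySem.List.pyGetD n i ' '])
                         (String.ofList [PySem.List.pyGetD m i ' ']))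
    (PySem.Dict.empty : PySem.Dict String String)
  encripter.items

-- ===== PORT B =====
-- remaining = {}; for c in p: remaining[c] = remaining.get(c, 0) + 1
def pvCounts (p : List Char) : PySem.Dict Char Int :=
  p.foldl (fun d c => d.insert c (d.getD c 0 + 1)) PySem.Dict.empty

-- m = []; for c in p: remaining[c] = remaining[c] - 1; if remaining[c] == 0: m.append(c)
def pvLastPass (p : List Char) : List Char :=
  (p.foldl (fun s c =>
      let d := s.1.insert c (s.1.getD c 0 - 1)
      if d.getD c 0 == 0 then (d, s.2 ++ [c]) else (d, s.2))
    (pvCounts p, ([] : List Char))).2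

def becomeencripter_alt (y : String) : List (String × String) :=
  let p := y.toList.filter (fun c => PySem.Chars.islower c)
  let m := pvLastPass p
  let n := PySem.List.sorted m (fun c => c) false
  (((n.zip m).foldl
      (fun d ab => d.insert (String.ofList [ab.1]) (String.ofList [ab.2]))
      (PySem.Dict.empty : PySem.Dict String String)).items)

-- ===== PRECONDITION & SPEC =====
def Spec_becomeencripter (y : String) (out : List (String × String)) : Prop := out = becomeencripter_alt y
instance (y : String) (out : List (String × String)) : Decidable (Spec_becomeencripter y out) := by unfold Spec_becomeencripter; infer_instance

-- ===== CLAIM (what is proved, stated in full; the proofs are below) =====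
def Claim_equal_becomeencripter : Prop := ∀ (y : String), Dom_becomeencripter y → Spec_becomeencripter y (becomeencripter y)

-- ===== LEMMAS AND PROOFS =====

-- dedup keeping the LAST occurrence of each char, in order (reference form both ports reach)
def pvDedupLast : List Char → List Char
  | [] => []
  | c :: rest => if c ∈ rest then pvDedupLast rest else c :: pvDedupLast rest

theorem pvLastPass_loop (t : List Char) (d : PySem.Dict Char Int) (out : List Char)
    (hinv : ∀ a, d.getD a 0 = (t.count a : Int)) :
    (t.foldl (fun s c =>
      let d := s.1.insert c (s.1.getD c 0 - 1)
      if d.getD c 0 == 0 then (d, s.2 ++ [c]) else (d, s.2)) (d, out)).2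
    = out ++ pvDedupLast t := by
  induction t generalizing d out with
  | nil => simp [pvDedupLast]
  | cons c t' ih =>
    simp only [List.foldl_cons]
    have hd' : ∀ a, (d.insert c (d.getD c 0 - 1)).getD a 0 = (t'.count a : Int) := by
      intro a
      rw [PySem.Dict.getD_insert]
      by_cases hac : a = c
      · subst hac
        rw [if_pos rfl, hinv]
        simp
      · rw [if_neg hac, hinv]
        simp [Ne.symm hac]
    have hcond : ((d.insert c (d.getD c 0 - 1)).getD c 0 == 0) = decide (c ∉ t') := by
      rw [hd' c]
      by_cases hmem : c ∈ t'
      · have : t'.count c ≠ 0 := by simpa [List.count_eq_zero] using hmem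
        simp [hmem, Int.natCast_eq_zero, this]
      · have : t'.count c = 0 := by simpa [List.count_eq_zero] using hmem
        simp [hmem, this]
    by_cases hmem : c ∈ t'
    · rw [hcond]
      simp only [hmem, not_true_eq_false, decide_false]
      show (t'.foldl _ (d.insert c (d.getD c 0 - 1), out)).2 = out ++ pvDedupLast (c :: t')
      rw [ih _ _ hd']
      simp only [pvDedupLast, if_pos hmem]
    · rw [hcond]
      simp only [hmem, not_false_eq_true, decide_true]
      show (t'.foldl _ (d.insert c (d.getD c 0 - 1), out ++ [c])).2 = out ++ pvDedupLast (c :: t')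
      rw [ih _ _ hd']
      simp [pvDedupLast, if_neg hmem]

theorem pvLastPass_eq_dedupLast (p : List Char) : pvLastPass p = pvDedupLast p := by
  unfold pvLastPass
  rw [pvLastPass_loop p (pvCounts p) []]
  · simp
  · intro a
    unfold pvCounts
    rw [PySem.Dict.foldl_insert_getD_add_one_eq_counter, PySem.Dict.getD_counter]



theorem pvSingInj : Function.Injective (fun c : Char => String.ofList [c]) := by
  intro a b h
  have := congrArg String.toList h
  simpa using this

theorem pvDedupLast_eq_dedup (l : List Char) : pvDedupLast l = l.dedup := by
  induction l with
  | nil => rfl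
  | cons c rest ih =>
    by_cases h : c ∈ rest
    · simp [pvDedupLast, h, List.dedup_cons_of_mem, ih]
    · simp [pvDedupLast, h, List.dedup_cons_of_notMem, ih]

theorem pvBecomekey_eq_filter (x : List Char) :
    pvBecomekey x = x.filter (fun c => PySem.Chars.islower c) := by
  unfold pvBecomekey
  rw [PySem.List.foldl_pyRange_zero_pyGetD' x ' '
      (fun chiave c => if PySem.Chars.islower c = true then chiave ++ [c] else chiave) []]
  rw [PySem.List.foldl_append_if]
  simp

theorem pvDisordinata_eq_dedupLast (p : List Char) :
    pvDisordinata p = pvDedupLast p := by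
  unfold pvDisordinata
  rw [PySem.List.slice?_none_none_neg_one]
  simp only [Option.getD_some]
  induction p with
  | nil => rfl
  | cons c rest ih =>
    rw [List.reverse_cons, List.foldl_append]
    simp only [List.foldl_cons, List.foldl_nil]
    by_cases h : c ∈ rest.reverse.foldl (fun visto i => if i ∈ visto then visto else visto ++ [i]) []
    · have hc : c ∈ rest := by
        have h2 : c ∈ pvDedupLast rest := by rw [← ih]; simpa using h
        rw [pvDedupLast_eq_dedup] at h2; simpa [List.mem_dedup] using h2
      rw [if_pos h]
      simp only [pvDedupLast]
      rw [if_pos hc]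
      exact ih
    · have hc : c ∉ rest := by
        intro hm
        apply h
        have h2 : c ∈ pvDedupLast rest := by rw [pvDedupLast_eq_dedup]; simpa [List.mem_dedup] using hm
        rw [← ih] at h2; simpa using h2
      rw [if_neg h]
      simp only [pvDedupLast]
      rw [if_neg hc, List.reverse_append, List.reverse_singleton, List.singleton_append, ih]

theorem pvMapComp (m : List Char) (xs : List Char)
    (h : (PySem.List.pyRange 0 (m.length : Int) 1).map (fun i => PySem.List.pyGetD xs i ' ') = xs) :
    (PySem.List.pyRange 0 (m.length : Int) 1).map (fun i => String.ofList [PySem.List.pyGetD xs i ' '])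
      = xs.map (fun c => String.ofList [c]) := by
  conv_rhs => rw [← h]
  rw [List.map_map]
  rfl

theorem items_eq_zipmap (n m : List Char) (hn : n.Nodup) (hlen : n.length = m.length) :
    ((PySem.List.pyRange 0 (m.length : Int) 1).foldl
      (fun d i => d.insert (String.ofList [PySem.List.pyGetD n i ' '])
                           (String.ofList [PySem.List.pyGetD m i ' ']))
      (PySem.Dict.empty : PySem.Dict String String)).items
    = ((n.zip m).foldl
        (fun d ab => d.insert (String.ofList [ab.1]) (String.ofList [ab.2]))
        (PySem.Dict.empty : PySem.Dict String String)).items := by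
  have hmapn : (PySem.List.pyRange 0 (m.length : Int) 1).map (fun i => PySem.List.pyGetD n i ' ') = n := by
    rw [← hlen]
    exact PySem.List.map_pyGetD_pyRange_zero' n ' '
  have hmapm : (PySem.List.pyRange 0 (m.length : Int) 1).map (fun i => PySem.List.pyGetD m i ' ') = m :=
    PySem.List.map_pyGetD_pyRange_zero' m ' '
  have hnodA : ((PySem.List.pyRange 0 (m.length : Int) 1).map
      (fun i => String.ofList [PySem.List.pyGetD n i ' '])).Nodup := by
    rw [pvMapComp m n hmapn]
    exact hn.map pvSingInj
  have hzipfst : ((n.zip m)).map (fun ab => String.ofList [ab.1]) = n.map (fun c => String.ofList [c]) := by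
    have h1 : ((n.zip m)).map (fun ab => String.ofList [ab.1])
        = ((n.zip m).map Prod.fst).map (fun c => String.ofList [c]) := by
      rw [List.map_map]; rfl
    rw [h1, List.map_fst_zip (le_of_eq hlen)]
  have hnodB : (((n.zip m)).map (fun ab => String.ofList [ab.1])).Nodup := by
    rw [hzipfst]
    exact hn.map pvSingInj
  rw [PySem.Dict.items_foldl_insert_fresh _ _ _ _ (by intro a _; rfl) hnodA,
      PySem.Dict.items_foldl_insert_fresh _ _ _ _ (by intro a _; rfl) hnodB]
  show (PySem.List.pyRange 0 (m.length : Int) 1).map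
        (fun i => (String.ofList [PySem.List.pyGetD n i ' '], String.ofList [PySem.List.pyGetD m i ' ']))
      = (n.zip m).map (fun ab => (String.ofList [ab.1], String.ofList [ab.2]))
  calc (PySem.List.pyRange 0 (m.length : Int) 1).map
        (fun i => (String.ofList [PySem.List.pyGetD n i ' '], String.ofList [PySem.List.pyGetD m i ' ']))
      = List.zip ((PySem.List.pyRange 0 (m.length : Int) 1).map (fun i => String.ofList [PySem.List.pyGetD n i ' ']))
                 ((PySem.List.pyRange 0 (m.length : Int) 1).map (fun i => String.ofList [PySem.List.pyGetD m i ' '])) := by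
        rw [List.zip_map']
    _ = List.zip (n.map (fun c => String.ofList [c])) (m.map (fun c => String.ofList [c])) := by
        rw [pvMapComp m n hmapn, pvMapComp m m hmapm]
    _ = (n.zip m).map (fun ab => (String.ofList [ab.1], String.ofList [ab.2])) := by
        rw [List.zip_map]; rfl

-- ===== VERDICT (by name: the statement is the Claim_ definition above) =====
theorem becomeencripter_spec : Claim_equal_becomeencripter := by
  intro y _
  unfold Spec_becomeencripter becomeencripter becomeencripter_alt
  simp only [pvBecomekey_eq_filter, pvDisordinata_eq_dedupLast, pvLastPass_eq_dedupLast]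
  apply items_eq_zipmap
  · rw [pvDedupLast_eq_dedup]
    exact ((PySem.List.sorted_perm _ _ _).nodup_iff).mpr (List.nodup_dedup _)
  · exact PySem.List.length_sorted _ _ _
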